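-- pv_equiv track=rewrite | github.com/Rodrigo30406/facial-recognition-lab | src/eleccia_vision/application/quality_gate.py | build_angle_plan
-- ===== SOURCE A (Python) =====
-- from typing import Literal
--
-- AngleBucket = Literal["center", "left", "right", "up", "down"]
--
-- _ANGLE_ORDER: tuple[AngleBucket, ...] = ("center", "left", "right", "up", "down")
--
-- def build_angle_plan(target_samples: int) -> dict[AngleBucket, int]:
--     if target_samples < 1:
--         raise ValueError("target_samples must be >= 1")
--
--     plan: dict[AngleBucket, int] = {bucket: 0 for bucket in _ANGLE_ORDER}
--     for bucket in _ANGLE_ORDER: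
--         if sum(plan.values()) >= target_samples:
--             break
--         plan[bucket] += 1
--
--     i = 0
--     while sum(plan.values()) < target_samples:
--         plan[_ANGLE_ORDER[i % len(_ANGLE_ORDER)]] += 1
--         i += 1
--     return plan
-- ===== SOURCE B (Python) =====
-- _ANGLE_ORDER = ("center", "left", "right", "up", "down")
--
-- def build_angle_plan(target_samples):
--     if target_samples < 1:
--         raise ValueError("target_samples must be >= 1")
--     base, extra = divmod(target_samples, 5)
--     return {b: base + (1 if i < extra else 0) for i, b in enumerate(_ANGLE_ORDER)}
-- ===== Notes on version B (the rewrite author's own statement) =====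
-- stated objective: faster
-- what changed: Replaced the one-increment-at-a-time round-robin loops (re-summing the dict each iteration) with the closed form base = n//5 plus one extra for the first n%5 buckets.
import Mathlib
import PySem

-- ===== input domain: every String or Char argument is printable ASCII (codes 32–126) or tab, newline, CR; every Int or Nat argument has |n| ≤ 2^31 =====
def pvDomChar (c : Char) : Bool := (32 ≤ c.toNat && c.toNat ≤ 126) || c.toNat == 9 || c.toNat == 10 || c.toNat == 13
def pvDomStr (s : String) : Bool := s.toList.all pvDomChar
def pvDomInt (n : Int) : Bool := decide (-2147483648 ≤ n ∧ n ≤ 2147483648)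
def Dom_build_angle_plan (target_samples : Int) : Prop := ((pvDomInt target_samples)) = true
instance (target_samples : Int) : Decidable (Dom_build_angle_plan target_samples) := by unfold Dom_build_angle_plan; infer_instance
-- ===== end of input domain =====

-- B replaces A's one-increment-at-a-time round-robin loops by the closed form
-- base = n//5 with one extra for the first n%5 buckets (objective: faster, O(1) vs O(n)).

-- ===== PORT A =====
-- _ANGLE_ORDER
def pvOrder : List String := ["center", "left", "right", "up", "down"]

-- sum(plan.values())
def pvSum (plan : PySem.Dict String Int) : Int := (PySem.Dict.values plan).sum

-- 'for bucket in _ANGLE_ORDER: if sum(plan.values()) >= target: break; plan[bucket] += 1'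
def pvLoopA (t : Int) (order : List String) (plan : PySem.Dict String Int) :
    PySem.Dict String Int :=
  match order with
  | [] => plan
  | b :: rest =>
      if pvSum plan ≥ t then plan
      else pvLoopA t rest (plan.modify b 0 (· + 1))

-- 'while sum(plan.values()) < target: plan[_ANGLE_ORDER[i % 5]] += 1; i += 1'
-- (the key is always present so _ANGLE_ORDER[i % len] never raises; the inner dite is only a
-- termination guard — it always takes the then-branch on reachable states, proved in the lemmas)
def pvLoopW (t : Int) (plan : PySem.Dict String Int) (i : Nat) : PySem.Dict String Int :=
  if pvSum plan < t then
    if h : pvSum (plan.modify ((PySem.List.pyGet? pvOrder ((i % pvOrder.length : Nat) : Int)).getD "") 0 (· + 1)) = pvSum plan + 1 then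
      pvLoopW t (plan.modify ((PySem.List.pyGet? pvOrder ((i % pvOrder.length : Nat) : Int)).getD "") 0 (· + 1)) (i + 1)
    else plan
  else plan
termination_by (t - pvSum plan).toNat
decreasing_by
  omega

def build_angle_plan (target_samples : Int) : List (String × Int) :=
  -- the 'target_samples < 1: raise ValueError' branch is excluded by Pre_build_angle_plan
  let plan0 := pvOrder.foldl (fun d b => d.insert b (0 : Int)) PySem.Dict.empty
  let plan1 := pvLoopA target_samples pvOrder plan0
  (pvLoopW target_samples plan1 0).items

-- ===== PORT B =====
def build_angle_plan_alt (target_samples : Int) : List (String × Int) :=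
  -- base, extra = divmod(target_samples, 5)
  let base := PySem.Int.floordiv target_samples 5
  let extra := PySem.Int.mod target_samples 5
  (PySem.List.enumerate ["center", "left", "right", "up", "down"] 0).map
    (fun p => (p.2, base + (if p.1 < extra then 1 else 0)))

-- ===== PRECONDITION & SPEC =====
-- Pre_ excludes exactly target_samples < 1, where A raises ValueError (B raises there too).
def Pre_build_angle_plan (target_samples : Int) : Prop := 1 ≤ target_samples
instance (target_samples : Int) : Decidable (Pre_build_angle_plan target_samples) := by
  unfold Pre_build_angle_plan; infer_instance

def pvWitness_build_angle_plan : Int := (7)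

def Spec_build_angle_plan (target_samples : Int) (out : List (String × Int)) : Prop := out = build_angle_plan_alt target_samples
instance (target_samples : Int) (out : List (String × Int)) : Decidable (Spec_build_angle_plan target_samples out) := by unfold Spec_build_angle_plan; infer_instance

-- ===== CLAIM (what is proved, stated in full; the proofs are below) =====
def Claim_equal_build_angle_plan : Prop := ∀ (target_samples : Int), Dom_build_angle_plan target_samples → Pre_build_angle_plan target_samples → Spec_build_angle_plan target_samples (build_angle_plan target_samples)

-- ===== LEMMAS AND PROOFS =====

-- a concrete 5-key plan dict
def pvMk (a b c d e : Int) : PySem.Dict String Int :=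
  PySem.Dict.mk [("center", a), ("left", b), ("right", c), ("up", d), ("down", e)]

theorem pvSum_mk (a b c d e : Int) : pvSum (pvMk a b c d e) = a + b + c + d + e := by
  simp [pvSum, pvMk, PySem.Dict.values]
  ring

theorem pvLoopW_stop (t : Int) (p : PySem.Dict String Int) (i : Nat) (h : ¬ pvSum p < t) :
    pvLoopW t p i = p := by
  rw [pvLoopW.eq_def]; simp [h]

theorem pvLoopW_step (t : Int) (p p' : PySem.Dict String Int) (i : Nat) (h : pvSum p < t)
    (hk : p.modify ((PySem.List.pyGet? pvOrder ((i % pvOrder.length : Nat) : Int)).getD "") 0 (· + 1) = p')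
    (h2 : pvSum p' = pvSum p + 1) :
    pvLoopW t p i = pvLoopW t p' (i + 1) := by
  rw [pvLoopW.eq_def]
  simp only [hk, h, if_true, h2, dif_pos]

theorem pvLoopW_stuck (t : Int) (p : PySem.Dict String Int) (i : Nat) (h : pvSum p < t)
    (h2 : ¬ pvSum (p.modify ((PySem.List.pyGet? pvOrder ((i % pvOrder.length : Nat) : Int)).getD "") 0 (· + 1)) = pvSum p + 1) :
    pvLoopW t p i = p := by
  rw [pvLoopW.eq_def]
  simp only [h, if_true, h2, dif_neg, not_false_iff]

theorem pvShift : ∀ (n : Nat) (t : Int) (p : PySem.Dict String Int) (j : Nat),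
    (t - pvSum p).toNat ≤ n → pvLoopW t p (j + 5) = pvLoopW t p j := by
  intro n
  induction n with
  | zero =>
      intro t p j hm
      have h : ¬ pvSum p < t := by omega
      rw [pvLoopW_stop t p _ h, pvLoopW_stop t p _ h]
  | succ n ih =>
      intro t p j hm
      by_cases hc : pvSum p < t
      · have hkey : (((j + 5) % pvOrder.length : Nat) : Int) = ((j % pvOrder.length : Nat) : Int) := by
          simp [pvOrder]
        set p' := p.modify ((PySem.List.pyGet? pvOrder ((j % pvOrder.length : Nat) : Int)).getD "") 0 (· + 1) with hp'
        by_cases h2 : pvSum p' = pvSum p + 1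
        · rw [pvLoopW_step t p p' (j + 5) hc (by rw [hkey]) h2,
             pvLoopW_step t p p' j hc rfl h2]
          have he : j + 5 + 1 = (j + 1) + 5 := by omega
          rw [he]
          exact ih t p' (j + 1) (by omega)
        · rw [pvLoopW_stuck t p (j + 5) hc (by rw [hkey]; exact h2),
             pvLoopW_stuck t p j hc h2]
      · rw [pvLoopW_stop t p _ hc, pvLoopW_stop t p _ hc]

-- round-robin share of the j-th bucket after n one-step increments starting at index 0
def pvV (n : Nat) (j : Nat) : Int := (n / 5 : Nat) + (if j < n % 5 then 1 else 0)

theorem pvStep0 (t x y z u v : Int) (h : x + y + z + u + v < t) :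
    pvLoopW t (pvMk x y z u v) 0 = pvLoopW t (pvMk (x + 1) y z u v) 1 :=
  pvLoopW_step t _ _ 0 (by rw [pvSum_mk]; exact h)
    (by rw [show (PySem.List.pyGet? pvOrder (((0 % pvOrder.length : Nat)) : Int)).getD "" = "center" from by decide]
        simp [pvMk, PySem.Dict.modify, PySem.Dict.insert,
          PySem.Dict.getD, PySem.Dict.get?, PySem.Dict.contains])
    (by rw [pvSum_mk, pvSum_mk]; ring)

theorem pvStep1 (t x y z u v : Int) (h : x + y + z + u + v < t) :
    pvLoopW t (pvMk x y z u v) 1 = pvLoopW t (pvMk x (y + 1) z u v) 2 :=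
  pvLoopW_step t _ _ 1 (by rw [pvSum_mk]; exact h)
    (by rw [show (PySem.List.pyGet? pvOrder (((1 % pvOrder.length : Nat)) : Int)).getD "" = "left" from by decide]
        simp [pvMk, PySem.Dict.modify, PySem.Dict.insert,
          PySem.Dict.getD, PySem.Dict.get?, PySem.Dict.contains])
    (by rw [pvSum_mk, pvSum_mk]; ring)

theorem pvStep2 (t x y z u v : Int) (h : x + y + z + u + v < t) :
    pvLoopW t (pvMk x y z u v) 2 = pvLoopW t (pvMk x y (z + 1) u v) 3 :=
  pvLoopW_step t _ _ 2 (by rw [pvSum_mk]; exact h)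
    (by rw [show (PySem.List.pyGet? pvOrder (((2 % pvOrder.length : Nat)) : Int)).getD "" = "right" from by decide]
        simp [pvMk, PySem.Dict.modify, PySem.Dict.insert,
          PySem.Dict.getD, PySem.Dict.get?, PySem.Dict.contains])
    (by rw [pvSum_mk, pvSum_mk]; ring)

theorem pvStep3 (t x y z u v : Int) (h : x + y + z + u + v < t) :
    pvLoopW t (pvMk x y z u v) 3 = pvLoopW t (pvMk x y z (u + 1) v) 4 :=
  pvLoopW_step t _ _ 3 (by rw [pvSum_mk]; exact h)
    (by rw [show (PySem.List.pyGet? pvOrder (((3 % pvOrder.length : Nat)) : Int)).getD "" = "up" from by decide]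
        simp [pvMk, PySem.Dict.modify, PySem.Dict.insert,
          PySem.Dict.getD, PySem.Dict.get?, PySem.Dict.contains])
    (by rw [pvSum_mk, pvSum_mk]; ring)

theorem pvStep4 (t x y z u v : Int) (h : x + y + z + u + v < t) :
    pvLoopW t (pvMk x y z u v) 4 = pvLoopW t (pvMk x y z u (v + 1)) 5 :=
  pvLoopW_step t _ _ 4 (by rw [pvSum_mk]; exact h)
    (by rw [show (PySem.List.pyGet? pvOrder (((4 % pvOrder.length : Nat)) : Int)).getD "" = "down" from by decide]
        simp [pvMk, PySem.Dict.modify, PySem.Dict.insert,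
          PySem.Dict.getD, PySem.Dict.get?, PySem.Dict.contains])
    (by rw [pvSum_mk, pvSum_mk]; ring)

theorem pvV_add5 (m j : Nat) : pvV (m + 5) j = pvV m j + 1 := by
  have h1 : (m + 5) / 5 = m / 5 + 1 := by omega
  have h2 : (m + 5) % 5 = m % 5 := by omega
  simp [pvV, h1, h2]
  ring

theorem pvG : ∀ (n : Nat) (t a b c d e : Int), (a + b + c + d + e) + (n : Int) = t →
    pvLoopW t (pvMk a b c d e) 0 =
      pvMk (a + pvV n 0) (b + pvV n 1) (c + pvV n 2) (d + pvV n 3) (e + pvV n 4) := by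
  intro n
  induction n using Nat.strong_induction_on with
  | _ n ih =>
    intro t a b c d e h
    rcases n with _ | _ | _ | _ | _ | m
    · rw [pvLoopW_stop _ _ _ (by rw [pvSum_mk]; omega)]
      norm_num [pvV]
    · rw [pvStep0 _ _ _ _ _ _ (by push_cast at h; omega),
         pvLoopW_stop _ _ _ (by rw [pvSum_mk]; push_cast at h; omega)]
      norm_num [pvV]
    · rw [pvStep0 _ _ _ _ _ _ (by push_cast at h; omega),
         pvStep1 _ _ _ _ _ _ (by push_cast at h; omega),
         pvLoopW_stop _ _ _ (by rw [pvSum_mk]; push_cast at h; omega)]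
      norm_num [pvV]
    · rw [pvStep0 _ _ _ _ _ _ (by push_cast at h; omega),
         pvStep1 _ _ _ _ _ _ (by push_cast at h; omega),
         pvStep2 _ _ _ _ _ _ (by push_cast at h; omega),
         pvLoopW_stop _ _ _ (by rw [pvSum_mk]; push_cast at h; omega)]
      norm_num [pvV]
    · rw [pvStep0 _ _ _ _ _ _ (by push_cast at h; omega),
         pvStep1 _ _ _ _ _ _ (by push_cast at h; omega),
         pvStep2 _ _ _ _ _ _ (by push_cast at h; omega),
         pvStep3 _ _ _ _ _ _ (by push_cast at h; omega),
         pvLoopW_stop _ _ _ (by rw [pvSum_mk]; push_cast at h; omega)]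
      norm_num [pvV]
    · push_cast at h
      rw [pvStep0 _ _ _ _ _ _ (by omega),
         pvStep1 _ _ _ _ _ _ (by omega),
         pvStep2 _ _ _ _ _ _ (by omega),
         pvStep3 _ _ _ _ _ _ (by omega),
         pvStep4 _ _ _ _ _ _ (by omega)]
      rw [show (5 : Nat) = 0 + 5 from rfl,
         pvShift ((t - pvSum (pvMk (a + 1) (b + 1) (c + 1) (d + 1) (e + 1))).toNat) t _ 0 le_rfl]
      rw [ih m (by omega) t (a + 1) (b + 1) (c + 1) (d + 1) (e + 1) (by omega)]
      simp only [pvV_add5]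
      simp only [pvMk, PySem.Dict.mk.injEq, List.cons.injEq, Prod.mk.injEq, and_true, true_and]
      omega

theorem pvLoopA_cons (t : Int) (b : String) (rest : List String) (p : PySem.Dict String Int) :
    pvLoopA t (b :: rest) p =
      if pvSum p ≥ t then p else pvLoopA t rest (p.modify b 0 (· + 1)) := rfl

theorem pvPlan0 :
    pvOrder.foldl (fun d b => d.insert b (0 : Int)) PySem.Dict.empty = pvMk 0 0 0 0 0 := by
  decide

theorem pvLoopA_big (t : Int) (h : 5 ≤ t) :
    pvLoopA t pvOrder (pvMk 0 0 0 0 0) = pvMk 1 1 1 1 1 := by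
  rw [show pvOrder = ["center", "left", "right", "up", "down"] from rfl]
  rw [pvLoopA_cons, if_neg (by rw [pvSum_mk]; omega),
      show (pvMk 0 0 0 0 0 : PySem.Dict String Int).modify "center" 0 (· + 1) = pvMk 1 0 0 0 0 from by decide]
  rw [pvLoopA_cons, if_neg (by rw [pvSum_mk]; omega),
      show (pvMk 1 0 0 0 0 : PySem.Dict String Int).modify "left" 0 (· + 1) = pvMk 1 1 0 0 0 from by decide]
  rw [pvLoopA_cons, if_neg (by rw [pvSum_mk]; omega),
      show (pvMk 1 1 0 0 0 : PySem.Dict String Int).modify "right" 0 (· + 1) = pvMk 1 1 1 0 0 from by decide]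
  rw [pvLoopA_cons, if_neg (by rw [pvSum_mk]; omega),
      show (pvMk 1 1 1 0 0 : PySem.Dict String Int).modify "up" 0 (· + 1) = pvMk 1 1 1 1 0 from by decide]
  rw [pvLoopA_cons, if_neg (by rw [pvSum_mk]; omega),
      show (pvMk 1 1 1 1 0 : PySem.Dict String Int).modify "down" 0 (· + 1) = pvMk 1 1 1 1 1 from by decide]
  rfl

-- ===== VERDICT (by name: the statement is the Claim_ definition above) =====
theorem build_angle_plan_spec : Claim_equal_build_angle_plan := by
  intro t hdom hpre
  show build_angle_plan t = build_angle_plan_alt t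
  have hpre' : 1 ≤ t := hpre
  rcases (by omega : t = 1 ∨ t = 2 ∨ t = 3 ∨ t = 4 ∨ 5 ≤ t) with h | h | h | h | h
  · subst h
    simp only [build_angle_plan, pvPlan0]
    rw [ show pvLoopA 1 pvOrder (pvMk 0 0 0 0 0) = pvMk 1 0 0 0 0 from by decide,
        pvLoopW_stop _ _ _ (by decide)]
    decide
  · subst h
    simp only [build_angle_plan, pvPlan0]
    rw [ show pvLoopA 2 pvOrder (pvMk 0 0 0 0 0) = pvMk 1 1 0 0 0 from by decide,
        pvLoopW_stop _ _ _ (by decide)]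
    decide
  · subst h
    simp only [build_angle_plan, pvPlan0]
    rw [ show pvLoopA 3 pvOrder (pvMk 0 0 0 0 0) = pvMk 1 1 1 0 0 from by decide,
        pvLoopW_stop _ _ _ (by decide)]
    decide
  · subst h
    simp only [build_angle_plan, pvPlan0]
    rw [ show pvLoopA 4 pvOrder (pvMk 0 0 0 0 0) = pvMk 1 1 1 1 0 from by decide,
        pvLoopW_stop _ _ _ (by decide)]
    decide
  · simp only [build_angle_plan, pvPlan0]
    show (pvLoopW t (pvLoopA t pvOrder (pvMk 0 0 0 0 0)) 0).items = build_angle_plan_alt t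
    rw [pvLoopA_big t h]
    set n : Nat := (t - 5).toNat with hn
    rw [pvG n t 1 1 1 1 1 (by omega)]
    have hfd : PySem.Int.floordiv t 5 = t / 5 := PySem.Int.floordiv_eq_ediv_of_pos (by norm_num)
    have hmod : PySem.Int.mod t 5 = t % 5 := PySem.Int.mod_eq_emod_of_pos (by norm_num)
    simp only [build_angle_plan_alt, hfd, hmod, pvMk,
      PySem.List.enumerate, List.map]
    norm_num
    unfold pvV
    have hnt : (n : Int) = t - 5 := by omega
    refine ⟨?_, ?_, ?_, ?_, ?_⟩ <;> (split_ifs <;> omega)
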